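-- pv_equiv track=rewrite | github.com/rcedgar/palm_annot | py/palm_diamond_motif_search.py | GetMotif
-- ===== SOURCE A (Python) =====
-- def GetMotif(QRow, TRow, TPos, n):
-- 	Motif = ""
-- 	j = 0
-- 	ColCount = len(QRow)
-- 	assert len(TRow) == ColCount
-- 	for Col in range(0, ColCount):
-- 		q = QRow[Col]
-- 		t = TRow[Col]
-- 		if j >= TPos and q != '-':
-- 			Motif += q
-- 			if len(Motif) == n:
-- 				return Motif
-- 		if t != '-':
-- 			j += 1
-- 	return None
-- ===== SOURCE B (Python) =====
-- def GetMotif(QRow, TRow, TPos, n):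
--     # Pass 1: first column whose count of target non-gaps strictly before it reaches TPos.
--     start = None
--     j = 0
--     for col in range(len(TRow)):
--         if j >= TPos:
--             start = col
--             break
--         if TRow[col] != '-':
--             j += 1
--     if start is None:
--         return None
--     # Pass 2: collect non-gap query characters from the start column onward.
--     motif = ""
--     for col in range(start, len(QRow)):
--         q = QRow[col]
--         if q != '-':
--             motif += q
--             if len(motif) == n:
--                 return motif
--     return None
-- ===== Notes on version B (the rewrite author's own statement) =====
-- stated objective: simpler
-- what changed: Replaced A's single loop that threads both the motif accumulator and the target non-gap counter with two independent passes: first find the start column where the count of target non-gaps before it reaches TPos, then collect non-gap query characters from there; Pre_ excludes only unequal-length rows, on which A's assert raises.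
import Mathlib
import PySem

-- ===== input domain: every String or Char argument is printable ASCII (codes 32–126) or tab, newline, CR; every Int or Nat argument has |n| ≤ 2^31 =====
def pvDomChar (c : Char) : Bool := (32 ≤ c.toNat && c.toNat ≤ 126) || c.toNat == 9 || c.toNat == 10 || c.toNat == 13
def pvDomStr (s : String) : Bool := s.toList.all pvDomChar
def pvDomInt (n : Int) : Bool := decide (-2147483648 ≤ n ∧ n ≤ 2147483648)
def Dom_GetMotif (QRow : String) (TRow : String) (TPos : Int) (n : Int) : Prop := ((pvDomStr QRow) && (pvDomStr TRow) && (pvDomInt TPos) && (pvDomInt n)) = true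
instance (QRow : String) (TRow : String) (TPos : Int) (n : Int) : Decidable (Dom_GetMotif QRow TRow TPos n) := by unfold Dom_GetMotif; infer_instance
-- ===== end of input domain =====

-- B replaces A's single loop threading collection state and a non-gap counter by two
-- passes (find the start column, then collect); objective: simpler decomposition.

-- ===== PORT A =====
-- A's single loop: state is the accumulated Motif and the target non-gap count j.
def pvLoopA (TPos n : Int) : List Char → List Char → Int → List Char → Option String
  | [], _, _, _ => none
  | _ :: _, [], _, _ => none      -- unreachable under Pre_ (equal lengths)
  | q :: qs, t :: ts, j, M =>
    if TPos ≤ j ∧ q ≠ '-' then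
      let M' := M ++ [q]
      if (M'.length : Int) = n then some (String.mk M')
      else pvLoopA TPos n qs ts (if t ≠ '-' then j + 1 else j) M'
    else pvLoopA TPos n qs ts (if t ≠ '-' then j + 1 else j) M

def GetMotif (QRow : String) (TRow : String) (TPos : Int) (n : Int) : Option String :=
  -- Python raises AssertionError when the lengths differ; excluded by Pre_GetMotif.
  if QRow.toList.length = TRow.toList.length then
    pvLoopA TPos n QRow.toList TRow.toList 0 []
  else none

-- ===== PORT B =====
-- Pass 1: index of the first column whose count of target non-gaps strictly before it reaches TPos.
def pvFindStart (TPos : Int) : List Char → Int → Option Nat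
  | [], _ => none
  | t :: ts, j =>
    if TPos ≤ j then some 0
    else (pvFindStart TPos ts (if t ≠ '-' then j + 1 else j)).map (· + 1)

-- Pass 2: collect non-gap query characters until the motif has length n.
def pvCollect (n : Int) : List Char → List Char → Option String
  | [], _ => none
  | q :: qs, M =>
    if q ≠ '-' then
      let M' := M ++ [q]
      if (M'.length : Int) = n then some (String.mk M') else pvCollect n qs M'
    else pvCollect n qs M

def GetMotif_alt (QRow : String) (TRow : String) (TPos : Int) (n : Int) : Option String :=
  match pvFindStart TPos TRow.toList 0 with
  | none => none
  | some k => pvCollect n (QRow.toList.drop k) []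

-- ===== PRECONDITION & SPEC =====
-- Pre_ excludes exactly the inputs where A's assert raises (unequal row lengths).
def Pre_GetMotif (QRow : String) (TRow : String) (TPos : Int) (n : Int) : Prop :=
  QRow.toList.length = TRow.toList.length
instance (QRow : String) (TRow : String) (TPos : Int) (n : Int) : Decidable (Pre_GetMotif QRow TRow TPos n) := by unfold Pre_GetMotif; infer_instance

def pvWitness_GetMotif : String × String × Int × Int := ("AB-C", "A-BC", 1, 2)

def Spec_GetMotif (QRow : String) (TRow : String) (TPos : Int) (n : Int) (out : Option String) : Prop := out = GetMotif_alt QRow TRow TPos n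
instance (QRow : String) (TRow : String) (TPos : Int) (n : Int) (out : Option String) : Decidable (Spec_GetMotif QRow TRow TPos n out) := by unfold Spec_GetMotif; infer_instance

-- ===== CLAIM (what is proved, stated in full; the proofs are below) =====
def Claim_equal_GetMotif : Prop := ∀ (QRow : String) (TRow : String) (TPos : Int) (n : Int), Dom_GetMotif QRow TRow TPos n → Pre_GetMotif QRow TRow TPos n → Spec_GetMotif QRow TRow TPos n (GetMotif QRow TRow TPos n)

-- ===== LEMMAS AND PROOFS =====

-- Once TPos ≤ j, the collection condition holds forever; A's loop becomes B's pass 2.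
theorem pvLoopA_collect (TPos n : Int) (qs : List Char) :
    ∀ (ts : List Char) (j : Int) (M : List Char), TPos ≤ j → qs.length = ts.length →
      pvLoopA TPos n qs ts j M = pvCollect n qs M := by
  induction qs with
  | nil => intro ts j M _ _; simp [pvLoopA, pvCollect]
  | cons q qs ih =>
    intro ts j M hj hlen
    cases ts with
    | nil => simp at hlen
    | cons t ts =>
      simp only [List.length_cons, Nat.add_right_cancel_iff] at hlen
      have hj' : TPos ≤ (if t ≠ '-' then j + 1 else j) := by split <;> omega
      by_cases hq : q ≠ '-'
      · simp only [pvLoopA, pvCollect, if_pos (And.intro hj hq), if_pos hq]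
        split
        · rfl
        · exact ih _ _ _ hj' hlen
      · simp only [pvLoopA, pvCollect]
        rw [if_neg (by tauto), if_neg hq]
        exact ih _ _ _ hj' hlen

-- Before the start column A's loop accumulates nothing; relate it to pass 1 + pass 2.
theorem pvLoopA_split (TPos n : Int) (ts : List Char) :
    ∀ (qs : List Char) (j : Int), qs.length = ts.length →
      pvLoopA TPos n qs ts j [] =
        (match pvFindStart TPos ts j with
         | none => none
         | some k => pvCollect n (qs.drop k) []) := by
  induction ts with
  | nil =>
    intro qs j hlen
    have : qs = [] := List.eq_nil_of_length_eq_zero hlen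
    subst this; simp [pvLoopA, pvFindStart]
  | cons t ts ih =>
    intro qs j hlen
    cases qs with
    | nil => simp at hlen
    | cons q qs =>
      simp only [List.length_cons, Nat.add_right_cancel_iff] at hlen
      by_cases hj : TPos ≤ j
      · simp only [pvFindStart, if_pos hj, List.drop_zero]
        exact pvLoopA_collect TPos n (q :: qs) (t :: ts) j [] hj (by simp [hlen])
      · have h1 : pvLoopA TPos n (q :: qs) (t :: ts) j [] =
            pvLoopA TPos n qs ts (if t ≠ '-' then j + 1 else j) [] := by
          simp only [pvLoopA]; rw [if_neg (by tauto)]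
        rw [h1, ih qs _ hlen]
        simp only [pvFindStart, if_neg hj]
        cases pvFindStart TPos ts (if t ≠ '-' then j + 1 else j) with
        | none => rfl
        | some k => simp

-- ===== VERDICT (by name: the statement is the Claim_ definition above) =====
theorem GetMotif_spec : Claim_equal_GetMotif := by
  intro QRow TRow TPos n _ hpre
  have hpre' : QRow.toList.length = TRow.toList.length := hpre
  unfold Spec_GetMotif GetMotif GetMotif_alt
  rw [if_pos hpre']
  exact pvLoopA_split TPos n TRow.toList QRow.toList 0 hpre'
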